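-- pv_equiv track=rewrite | github.com/eyalios/calculator-with-digit-recognition | nothing.py | rec_help
-- ===== SOURCE A (Python) =====
-- def rec_help(A,arr):
--     if(len(A)==1):
--         return [A]
--
--     res = [[A[0]]]
--     res1 =   rec_help(A[1:],arr)
--     for item in res1:
--             res.append(item)
--             if(len (item) < 3):
--                 res.append([A[0]] + item)
--             else:
--                 arr.append([A[0]] + item)
--     return res
-- ===== SOURCE B (Python) =====
-- def rec_help(A, arr):
--     # Iterative right-to-left version; same return value as the recursive one.
--     # (Like the original, it appends the length-3 combinations to arr in place.)
--     res = [[A[-1]]]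
--     for i in range(len(A) - 2, -1, -1):
--         new_res = [[A[i]]]
--         for item in res:
--             new_res.append(item)
--             if len(item) < 3:
--                 new_res.append([A[i]] + item)
--             else:
--                 arr.append([A[i]] + item)
--         res = new_res
--     return res
-- ===== Notes on version B (the rewrite author's own statement) =====
-- stated objective: alternative
-- what changed: Replaced the head recursion (recurse on A[1:], then combine) by an explicit right-to-left index loop that maintains the current result list, removing recursion entirely.
import Mathlib
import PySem

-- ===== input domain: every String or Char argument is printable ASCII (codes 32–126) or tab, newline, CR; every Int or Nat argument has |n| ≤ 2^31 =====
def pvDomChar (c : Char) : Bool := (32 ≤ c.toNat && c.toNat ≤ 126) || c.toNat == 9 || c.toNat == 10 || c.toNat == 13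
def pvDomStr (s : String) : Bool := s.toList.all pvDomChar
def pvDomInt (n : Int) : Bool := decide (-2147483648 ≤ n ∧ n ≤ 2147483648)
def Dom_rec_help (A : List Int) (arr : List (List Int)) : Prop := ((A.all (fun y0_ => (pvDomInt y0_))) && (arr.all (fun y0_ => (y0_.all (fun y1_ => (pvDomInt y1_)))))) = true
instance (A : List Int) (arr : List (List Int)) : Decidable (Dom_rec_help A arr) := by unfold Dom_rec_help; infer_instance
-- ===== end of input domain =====

-- B replaces A's head recursion by an explicit right-to-left index loop (alternative
-- decomposition, same cost). Both Pythons also append the length-≥3 combinations to arr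
-- in place, in the same order; the equivalence proved here is about the RETURN value only
-- (the arr appends are modelled in the fold state but not returned).

-- ===== PORT A =====
-- Loop state is (res, arr): res.append(item) then either res.append([A[0]]+item)
-- or arr.append([A[0]]+item); the arr component is the in-place side effect, dropped
-- at the end because Python returns only res.
def rec_help (A : List Int) (arr : List (List Int)) : List (List Int) :=
  match A with
  | [] => []                      -- Python: A[0] raises IndexError; excluded by Pre_
  | [a] => [[a]]
  | a :: b :: t =>
      let res1 := rec_help (b :: t) arr
      (res1.foldl
        (fun (s : List (List Int) × List (List Int)) item =>
          let r := s.1 ++ [item]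
          if item.length < 3 then (r ++ [[a] ++ item], s.2)
          else (r, s.2 ++ [[a] ++ item]))
        ([[a]], arr)).1

-- ===== PORT B =====
-- res = [[A[-1]]]; for i in range(len(A)-2, -1, -1): rebuild new_res from res,
-- appending [A[i]]+item to new_res (len<3) or to arr (otherwise); return res.
def rec_help_alt (A : List Int) (arr : List (List Int)) : List (List Int) :=
  match A with
  | [] => []                      -- Python: A[-1] raises IndexError; excluded by Pre_
  | _ :: _ =>
    ((PySem.List.pyRange ((A.length : Int) - 2) (-1) (-1)).foldl
      (fun (s : List (List Int) × List (List Int)) i =>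
        let x := PySem.List.pyGetD A i 0      -- A[i]; i is in range on every loop iteration
        s.1.foldl
          (fun (t : List (List Int) × List (List Int)) item =>
            let r := t.1 ++ [item]
            if item.length < 3 then (r ++ [[x] ++ item], t.2)
            else (r, t.2 ++ [[x] ++ item]))
          ([[x]], s.2))
      ([[PySem.List.pyGetD A (-1) 0]], arr)).1

-- ===== PRECONDITION & SPEC =====
-- Pre_ excludes exactly the empty list, on which Python A raises IndexError at A[0].
def Pre_rec_help (A : List Int) (arr : List (List Int)) : Prop := A ≠ []
instance (A : List Int) (arr : List (List Int)) : Decidable (Pre_rec_help A arr) := by unfold Pre_rec_help; infer_instance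
def pvWitness_rec_help : List Int × List (List Int) := ([1, 2, 3, 4], [])

def Spec_rec_help (A : List Int) (arr : List (List Int)) (out : List (List Int)) : Prop := out = rec_help_alt A arr
instance (A : List Int) (arr : List (List Int)) (out : List (List Int)) : Decidable (Spec_rec_help A arr out) := by unfold Spec_rec_help; infer_instance

-- ===== CLAIM (what is proved, stated in full; the proofs are below) =====
def Claim_equal_rec_help : Prop := ∀ (A : List Int) (arr : List (List Int)), Dom_rec_help A arr → Pre_rec_help A arr → Spec_rec_help A arr (rec_help A arr)

-- ===== LEMMAS AND PROOFS =====

-- The pure (res-only) inner loop step shared by the characterisations of both ports.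
def step1 (x : Int) (r : List (List Int)) (item : List Int) : List (List Int) :=
  if item.length < 3 then r ++ [item] ++ [[x] ++ item] else r ++ [item]

-- The reference value: what both ports return.
def resOf : List Int → List (List Int)
  | [] => []
  | [a] => [[a]]
  | a :: b :: t => (resOf (b :: t)).foldl (step1 a) [[a]]

-- First projection of the paired inner loop is the pure fold (independent of arr).
theorem fst_inner_fold (x : Int) (l : List (List Int)) (r0 : List (List Int))
    (ar0 : List (List Int)) :
    (l.foldl
      (fun (s : List (List Int) × List (List Int)) item =>
        let r := s.1 ++ [item]
        if item.length < 3 then (r ++ [[x] ++ item], s.2)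
        else (r, s.2 ++ [[x] ++ item]))
      (r0, ar0)).1 = l.foldl (step1 x) r0 := by
  induction l generalizing r0 ar0 with
  | nil => rfl
  | cons item rest ih =>
      rw [List.foldl_cons, List.foldl_cons]
      by_cases h : item.length < 3
      · simpa [h, step1] using ih (r0 ++ [item] ++ [[x] ++ item]) ar0
      · simpa [h, step1] using ih (r0 ++ [item]) (ar0 ++ [[x] ++ item])

theorem rec_help_eq_resOf (A : List Int) (arr : List (List Int)) :
    rec_help A arr = resOf A := by
  induction A generalizing arr with
  | nil => rfl
  | cons a rest ih =>
      cases rest with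
      | nil => rfl
      | cons b t =>
          rw [rec_help, resOf]
          rw [fst_inner_fold, ih]

-- Index shift: the countdown range over a::rest splits into the shifted range over rest
-- followed by the final index 0.
theorem range_shift (m : Nat) :
    PySem.List.pyRange ((m : Int) - 1) (-1) (-1)
      = (PySem.List.pyRange ((m : Int) - 2) (-1) (-1)).map (· + 1) ++
        (if 1 ≤ m then [(0 : Int)] else []) := by
  cases m with
  | zero => simp [PySem.List.pyRange_neg_one_eq_nil]
  | succ k =>
      simp only [PySem.List.pyRange_neg_one]
      push_cast
      have h1 : ((k : Int) + 1 - 1 - (-1)).toNat = k + 1 := by omega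
      have h2 : ((k : Int) + 1 - 2 - (-1)).toNat = k := by omega
      rw [h1, h2, List.range_succ, List.map_append, List.map_map]
      refine congrArg₂ _ (List.map_congr_left fun j hj => ?_) ?_
      · simp only [Function.comp_apply]; ring
      · simp

theorem pyGetD_cons_shift (a : Int) (rest : List Int) (i : Int) (hi : 0 ≤ i) :
    PySem.List.pyGetD (a :: rest) (i + 1) 0 = PySem.List.pyGetD rest i 0 := by
  obtain ⟨n, rfl⟩ := Int.eq_ofNat_of_zero_le hi
  have hn : (n : Int) + 1 = ((n + 1 : Nat) : Int) := by push_cast; ring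
  rw [hn, PySem.List.pyGetD_natCast, PySem.List.pyGetD_natCast]
  simp [List.getD]

-- The pure (res-only) outer loop step of B.
def gstep (A : List Int) (r : List (List Int)) (i : Int) : List (List Int) :=
  r.foldl (step1 (PySem.List.pyGetD A i 0)) [[PySem.List.pyGetD A i 0]]

-- First projection of B's paired outer loop is the pure outer fold.
theorem fst_outer_fold (A : List Int) (idxs : List Int)
    (s : List (List Int) × List (List Int)) :
    (idxs.foldl
      (fun (s : List (List Int) × List (List Int)) i =>
        let x := PySem.List.pyGetD A i 0
        s.1.foldl
          (fun (t : List (List Int) × List (List Int)) item =>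
            let r := t.1 ++ [item]
            if item.length < 3 then (r ++ [[x] ++ item], t.2)
            else (r, t.2 ++ [[x] ++ item]))
          ([[x]], s.2))
      s).1 = idxs.foldl (gstep A) s.1 := by
  induction idxs generalizing s with
  | nil => rfl
  | cons i rest ih =>
      rw [List.foldl_cons, List.foldl_cons, ih]
      rw [fst_inner_fold (PySem.List.pyGetD A i 0) s.1 [[PySem.List.pyGetD A i 0]] s.2]
      rfl

theorem pure_outer_eq_resOf (A : List Int) (h : A ≠ []) :
    (PySem.List.pyRange ((A.length : Int) - 2) (-1) (-1)).foldl (gstep A)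
      [[PySem.List.pyGetD A (-1) 0]] = resOf A := by
  induction A with
  | nil => exact absurd rfl h
  | cons a rest ih =>
      cases rest with
      | nil =>
          have hne : ([a] : List Int) ≠ [] := by simp
          rw [show ((([a] : List Int).length : Int) - 2) = -1 by simp,
            PySem.List.pyRange_neg_one_eq_nil (le_refl (-1))]
          simp [resOf, PySem.List.pyGetD_neg_one [a] 0 hne]
      | cons b t =>
          have hm : ((a :: b :: t).length : Int) - 2 = ((b :: t).length : Int) - 1 := by
            simp [List.length_cons]; ring
          rw [hm, range_shift (b :: t).length,
            if_pos (show 1 ≤ (b :: t).length by simp),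
            List.foldl_append, List.foldl_map]
          have hcong :
              (PySem.List.pyRange (((b :: t).length : Int) - 2) (-1) (-1)).foldl
                  (fun r i => gstep (a :: b :: t) r (i + 1))
                  [[PySem.List.pyGetD (a :: b :: t) (-1) 0]]
                = (PySem.List.pyRange (((b :: t).length : Int) - 2) (-1) (-1)).foldl
                  (gstep (b :: t)) [[PySem.List.pyGetD (b :: t) (-1) 0]] := by
            have hinit : PySem.List.pyGetD (a :: b :: t) (-1) 0
                = PySem.List.pyGetD (b :: t) (-1) 0 := by
              rw [PySem.List.pyGetD_neg_one (a :: b :: t) 0 (by simp),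
                PySem.List.pyGetD_neg_one (b :: t) 0 (by simp),
                List.getLast_cons (by simp)]
            rw [hinit]
            refine List.foldl_ext _ _ _ fun acc x hx => ?_
            have h0 : 0 ≤ x := by
              have := (PySem.List.mem_pyRange_neg_one).mp hx
              omega
            simp only [gstep, pyGetD_cons_shift a (b :: t) x h0]
          rw [hcong, ih (by simp)]
          rw [List.foldl_cons, List.foldl_nil]
          simp only [gstep, PySem.List.pyGetD_zero_cons]
          rfl

theorem rec_help_alt_eq_resOf (A : List Int) (arr : List (List Int)) (h : A ≠ []) :
    rec_help_alt A arr = resOf A := by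
  cases A with
  | nil => exact absurd rfl h
  | cons a rest =>
      rw [rec_help_alt]
      rw [fst_outer_fold (a :: rest) _ ([[PySem.List.pyGetD (a :: rest) (-1) 0]], arr)]
      exact pure_outer_eq_resOf (a :: rest) (by simp)

-- ===== VERDICT (by name: the statement is the Claim_ definition above) =====
theorem rec_help_spec : Claim_equal_rec_help := by
  intro A arr _ hpre
  unfold Spec_rec_help
  rw [rec_help_eq_resOf, rec_help_alt_eq_resOf _ _ hpre]
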